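-- pv_equiv track=rewrite | github.com/ftzm/hnefatafl | max_moves_constrained.py | greedy_add
-- ===== SOURCE A (Python) =====
-- SIZE = 11
--
-- def best_movers_subset(all_pieces, max_movers):
--     """Given a placement, find which subset of up to max_movers pieces yields max moves.
--     Uses greedy: pick piece with most moves, then recalc (moves don't change by picking subset
--     since ALL pieces are still on the board as obstacles regardless)."""
--     # Key insight: which pieces are "movers" doesn't affect blocking.
--     # ALL pieces block regardless. We just sum moves of the chosen movers.
--     # So we simply pick the max_movers pieces with the most individual moves.
--     row_pieces = [[] for _ in range(SIZE)]
--     col_pieces = [[] for _ in range(SIZE)]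
--     for r, c in all_pieces:
--         row_pieces[r].append(c)
--         col_pieces[c].append(r)
--     for i in range(SIZE):
--         row_pieces[i].sort()
--         col_pieces[i].sort()
--
--     piece_moves = []
--     for r, c in all_pieces:
--         cols = row_pieces[r]
--         idx = cols.index(c)
--         left = c - (cols[idx-1] + 1) if idx > 0 else c
--         right = (cols[idx+1] - 1) - c if idx < len(cols) - 1 else (SIZE - 1) - c
--         rows = col_pieces[c]
--         idy = rows.index(r)
--         up = r - (rows[idy-1] + 1) if idy > 0 else r
--         down = (rows[idy+1] - 1) - r if idy < len(rows) - 1 else (SIZE - 1) - r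
--         piece_moves.append((left + right + up + down, (r, c)))
--
--     # Pick top max_movers by individual move count
--     piece_moves.sort(reverse=True)
--     chosen = min(max_movers, len(piece_moves))
--     movers = {pos for _, pos in piece_moves[:chosen]}
--     total = sum(m for m, _ in piece_moves[:chosen])
--     return total, movers
--
-- def greedy_add(n, max_movers):
--     pieces = set()
--     for _ in range(n):
--         best_pos = None
--         best_val = -1
--         for r in range(SIZE):
--             for c in range(SIZE):
--                 if (r, c) not in pieces:
--                     val, _ = best_movers_subset(pieces | {(r, c)}, max_movers)
--                     if val > best_val:
--                         best_val = val
--                         best_pos = (r, c)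
--         pieces.add(best_pos)
--     return pieces, best_val
-- ===== SOURCE B (Python) =====
-- SIZE = 11
--
-- def _count_moves(occ, pos):
--     """Moves of a piece: scan outward in the four directions until an
--     obstacle or the board edge."""
--     r, c = pos
--     m = 0
--     for dr, dc in ((0, 1), (0, -1), (1, 0), (-1, 0)):
--         rr, cc = r + dr, c + dc
--         while 0 <= rr < SIZE and 0 <= cc < SIZE and (rr, cc) not in occ:
--             m += 1
--             rr += dr
--             cc += dc
--     return m
--
-- def greedy_add(n, max_movers):
--     pieces = set()
--     for _ in range(n):
--         best_pos = None
--         best_val = -1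
--         for r in range(SIZE):
--             for c in range(SIZE):
--                 if (r, c) in pieces:
--                     continue
--                 occ = pieces | {(r, c)}
--                 counts = sorted((_count_moves(occ, p) for p in occ), reverse=True)
--                 chosen = min(max_movers, len(counts))
--                 val = sum(counts[:chosen])
--                 if val > best_val:
--                     best_val = val
--                     best_pos = (r, c)
--         pieces.add(best_pos)
--     return pieces, best_val
-- ===== Notes on version B (the rewrite author's own statement) =====
-- stated objective: alternative
-- what changed: Each candidate placement is evaluated by scanning the four rays of every piece across the board with set-membership tests and summing the top slice of the sorted move counts, instead of A's rebuilding of per-row/per-column sorted lists with list.index neighbour arithmetic and a reverse sort of (moves, position) pairs.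
import Mathlib
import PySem

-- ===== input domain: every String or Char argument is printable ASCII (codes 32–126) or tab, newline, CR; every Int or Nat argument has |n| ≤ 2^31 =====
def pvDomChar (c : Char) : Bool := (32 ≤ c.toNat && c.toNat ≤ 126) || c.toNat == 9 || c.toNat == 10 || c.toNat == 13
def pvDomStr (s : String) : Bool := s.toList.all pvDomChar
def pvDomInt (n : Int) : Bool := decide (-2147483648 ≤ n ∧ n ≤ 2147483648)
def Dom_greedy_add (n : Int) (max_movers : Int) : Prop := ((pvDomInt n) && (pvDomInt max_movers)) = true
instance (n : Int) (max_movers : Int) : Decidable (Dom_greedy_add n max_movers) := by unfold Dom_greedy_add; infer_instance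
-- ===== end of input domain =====

-- B evaluates each candidate placement by scanning the four rays of every piece across the
-- board with membership tests, instead of A's per-row/per-column sorted lists with
-- list.index neighbour arithmetic and a sort of (moves, pos) pairs — a different evaluation
-- of the same greedy objective (objective: alternative).  Return values only; neither
-- version mutates its arguments.

-- ===== PORT A =====
-- row_pieces[i].append(v); the index is always in range on admitted inputs
def pvAppendAt (xss : List (List Int)) (i : Int) (v : Int) : List (List Int) :=
  PySem.List.pySetD xss i (PySem.List.pyGetD xss i [] ++ [v])

-- Python's tuple comparison on (moves, (r, c)) is lexicographic: key into the Lex product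
def pvKey3 (p : Int × (Int × Int)) : Lex (Int × Lex (Int × Int)) := toLex (p.1, toLex p.2)

-- the body of A's 'for r, c in all_pieces' loop, computing (left+right+up+down, (r, c));
-- c is always an element of cols (and r of rows) here, so .index() cannot raise
def pvPieceMove (row_pieces col_pieces : List (List Int)) (p : Int × Int) :
    Int × (Int × Int) :=
  let r := p.1
  let c := p.2
  let cols := PySem.List.pyGetD row_pieces r []
  let idx : Int := ((PySem.List.index? cols c).getD 0 : Nat)
  let left := if idx > 0 then c - (PySem.List.pyGetD cols (idx - 1) 0 + 1) else c
  let right := if idx < PySem.List.len cols - 1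
               then (PySem.List.pyGetD cols (idx + 1) 0 - 1) - c else (11 - 1) - c
  let rows := PySem.List.pyGetD col_pieces c []
  let idy : Int := ((PySem.List.index? rows r).getD 0 : Nat)
  let up := if idy > 0 then r - (PySem.List.pyGetD rows (idy - 1) 0 + 1) else r
  let down := if idy < PySem.List.len rows - 1
              then (PySem.List.pyGetD rows (idy + 1) 0 - 1) - r else (11 - 1) - r
  (left + right + up + down, (r, c))

-- row_pieces built by appending, then each list sorted ('for i in range(SIZE): ….sort()')
def pvRows (all_pieces : List (Int × Int)) : List (List Int) :=
  ((all_pieces.foldl (fun a p => pvAppendAt a p.1 p.2) (List.replicate 11 ([] : List Int))).map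
    (fun l => PySem.List.sorted l (fun x => x) false))

def pvColsL (all_pieces : List (Int × Int)) : List (List Int) :=
  ((all_pieces.foldl (fun a p => pvAppendAt a p.2 p.1) (List.replicate 11 ([] : List Int))).map
    (fun l => PySem.List.sorted l (fun x => x) false))

def best_movers_subset (all_pieces : List (Int × Int)) (max_movers : Int) :
    Int × List (Int × Int) :=
  let row_pieces := pvRows all_pieces
  let col_pieces := pvColsL all_pieces
  let piece_moves := all_pieces.foldl
    (fun acc p => acc ++ [pvPieceMove row_pieces col_pieces p]) []
  let piece_moves := PySem.List.sorted piece_moves pvKey3 true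
  let chosen := min max_movers (PySem.List.len piece_moves)
  let movers := PySem.Set.ofList
    ((PySem.List.slice piece_moves none (some chosen)).map (fun q => q.2))
  let total := ((PySem.List.slice piece_moves none (some chosen)).map (fun q => q.1)).sum
  (total, movers)

-- pieces.add(best_pos): Python would add None when best_pos is None (unreachable under Pre_)
def pvAddOpt (s : PySem.Set (Int × Int)) (o : Option (Int × Int)) : PySem.Set (Int × Int) :=
  match o with
  | some p => PySem.Set.add s p
  | none => s

-- the body of A's 'for _ in range(n)' loop: scan the 11×11 board for the best addition
def pvStepA (max_movers : Int) (st : PySem.Set (Int × Int) × Int) (_i : Int) :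
    PySem.Set (Int × Int) × Int :=
  let inner := (PySem.List.pyRange 0 11 1).foldl (fun acc r =>
    (PySem.List.pyRange 0 11 1).foldl (fun acc c =>
      if PySem.Set.contains st.1 (r, c) then acc
      else
        let val := (best_movers_subset (PySem.Set.union st.1 [(r, c)]) max_movers).1
        if val > acc.2 then (some (r, c), val) else acc) acc)
    ((none : Option (Int × Int)), (-1 : Int))
  (pvAddOpt st.1 inner.1, inner.2)

def greedy_add (n : Int) (max_movers : Int) : (List (Int × Int)) × Int :=
  (PySem.List.pyRange 0 n 1).foldl (pvStepA max_movers)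
    (([] : PySem.Set (Int × Int)), (-1 : Int))

-- ===== PORT B =====
-- one ray of B's while loop; fuel 11 bounds the at most 10 steps possible along an axis
def pvRayGo (occ : List (Int × Int)) (dr dc : Int) : Nat → Int → Int → Int
  | 0, _, _ => 0
  | fuel + 1, rr, cc =>
    if 0 ≤ rr ∧ rr < 11 ∧ 0 ≤ cc ∧ cc < 11 ∧ PySem.Set.contains occ (rr, cc) = false then
      1 + pvRayGo occ dr dc fuel (rr + dr) (cc + dc)
    else 0

def pvCountMoves (occ : List (Int × Int)) (pos : Int × Int) : Int :=
  [((0 : Int), (1 : Int)), (0, -1), (1, 0), (-1, 0)].foldl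
    (fun m d => m + pvRayGo occ d.1 d.2 11 (pos.1 + d.1) (pos.2 + d.2)) 0

-- B's evaluation of one candidate placement: sorted move counts, top slice summed
def pvAltVal (occ : List (Int × Int)) (max_movers : Int) : Int :=
  let counts := PySem.List.sorted (occ.map (fun p => pvCountMoves occ p)) (fun x => x) true
  let chosen := min max_movers (PySem.List.len counts)
  (PySem.List.slice counts none (some chosen)).sum

-- the body of B's 'for _ in range(n)' loop
def pvStepB (max_movers : Int) (st : PySem.Set (Int × Int) × Int) (_i : Int) :
    PySem.Set (Int × Int) × Int :=
  let inner := (PySem.List.pyRange 0 11 1).foldl (fun acc r =>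
    (PySem.List.pyRange 0 11 1).foldl (fun acc c =>
      if PySem.Set.contains st.1 (r, c) then acc
      else
        let val := pvAltVal (PySem.Set.union st.1 [(r, c)]) max_movers
        if val > acc.2 then (some (r, c), val) else acc) acc)
    ((none : Option (Int × Int)), (-1 : Int))
  (pvAddOpt st.1 inner.1, inner.2)

def greedy_add_alt (n : Int) (max_movers : Int) : (List (Int × Int)) × Int :=
  (PySem.List.pyRange 0 n 1).foldl (pvStepB max_movers)
    (([] : PySem.Set (Int × Int)), (-1 : Int))

-- ===== PRECONDITION & SPEC =====
-- Pre_ excludes n ≤ 0, where Python's best_val is unbound at the return (NameError), and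
-- n ≥ 122, where the board is full, best_pos stays None and None is put into the result
-- set (n = 122: a returned set containing None, not a list of int pairs; n ≥ 123: a raise).
def Pre_greedy_add (n : Int) (max_movers : Int) : Prop := 1 ≤ n ∧ n ≤ 121
instance (n : Int) (max_movers : Int) : Decidable (Pre_greedy_add n max_movers) := by
  unfold Pre_greedy_add; infer_instance
def pvWitness_greedy_add : Int × Int := (3, 2)
def Spec_greedy_add (n : Int) (max_movers : Int) (out : (List (Int × Int)) × Int) : Prop :=
  out = greedy_add_alt n max_movers
instance (n : Int) (max_movers : Int) (out : (List (Int × Int)) × Int) :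
    Decidable (Spec_greedy_add n max_movers out) := by unfold Spec_greedy_add; infer_instance

-- ===== CLAIM (what is proved, stated in full; the proofs are below) =====
def Claim_equal_greedy_add : Prop := ∀ (n : Int) (max_movers : Int),
  Dom_greedy_add n max_movers → Pre_greedy_add n max_movers →
  Spec_greedy_add n max_movers (greedy_add n max_movers)

-- ===== LEMMAS AND PROOFS =====

def pvInBoard (p : Int × Int) : Prop := 0 ≤ p.1 ∧ p.1 < 11 ∧ 0 ≤ p.2 ∧ p.2 < 11

def pvInv (s : List (Int × Int)) : Prop := s.Nodup ∧ ∀ q ∈ s, pvInBoard q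

theorem pv_foldAppend_getD (f g : (Int × Int) → Int) (l : List (Int × Int)) :
    ∀ (acc : List (List Int)), acc.length = 11 →
    (∀ p ∈ l, 0 ≤ f p ∧ f p < 11) → ∀ i : Int, 0 ≤ i → i < 11 →
    PySem.List.pyGetD (l.foldl (fun a p => pvAppendAt a (f p) (g p)) acc) i []
      = PySem.List.pyGetD acc i [] ++ (l.filter (fun p => f p == i)).map g := by
  induction l with
  | nil => intro acc _ _ i _ _; simp
  | cons x l ih =>
    intro acc hlen hl i h0 h1
    have hx := hl x (by simp)
    have hstep : pvAppendAt acc (f x) (g x) =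
        acc.set (f x).toNat (PySem.List.pyGetD acc (f x) [] ++ [g x]) := by
      unfold pvAppendAt
      rw [PySem.List.pySetD_of_nonneg _ _ hx.1]
    have hlen' : (pvAppendAt acc (f x) (g x)).length = 11 := by
      unfold pvAppendAt; rw [PySem.List.length_pySetD]; exact hlen
    have := ih (pvAppendAt acc (f x) (g x)) hlen' (fun p hp => hl p (by simp [hp])) i h0 h1
    rw [List.foldl_cons, this]
    have hgetset : PySem.List.pyGetD (pvAppendAt acc (f x) (g x)) i [] =
        if f x = i then PySem.List.pyGetD acc i [] ++ [g x] else PySem.List.pyGetD acc i [] := by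
      rw [hstep]
      rw [PySem.List.pyGetD_eq_getElem _ _ h0 (by simp only [List.length_set, hlen]; omega)]
      rw [List.getElem_set]
      obtain ⟨hx1, hx2⟩ := hx
      by_cases hfx : f x = i
      · rw [if_pos (by omega), if_pos hfx, hfx]
      · rw [if_neg (by omega), if_neg hfx]
        rw [PySem.List.pyGetD_eq_getElem _ _ h0 (by rw [hlen]; exact_mod_cast h1)]
    rw [hgetset]
    by_cases hfx : f x = i
    · simp [hfx]
    · simp [hfx]

theorem pv_contains_false_iff (s : List (Int × Int)) (q : Int × Int) :
    PySem.Set.contains s q = false ↔ q ∉ s := by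
  rw [← PySem.Set.contains_iff (s := s) (x := q)]
  simp

theorem pv_rayGo_eq (occ : List (Int × Int)) (dr dc : Int) (t : Nat) :
    ∀ (fuel : Nat) (rr cc : Int), t < fuel →
    (∀ i : Nat, i < t → (0 ≤ rr + i * dr ∧ rr + i * dr < 11 ∧ 0 ≤ cc + i * dc ∧
        cc + i * dc < 11 ∧ (rr + i * dr, cc + i * dc) ∉ occ)) →
    ¬ (0 ≤ rr + t * dr ∧ rr + t * dr < 11 ∧ 0 ≤ cc + t * dc ∧ cc + t * dc < 11 ∧
        (rr + t * dr, cc + t * dc) ∉ occ) →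
    pvRayGo occ dr dc fuel rr cc = (t : Int) := by
  induction t with
  | zero =>
    intro fuel rr cc hf _ hstop
    obtain ⟨m, rfl⟩ : ∃ m, fuel = m + 1 := ⟨fuel - 1, by omega⟩
    simp only [Nat.cast_zero, zero_mul, add_zero] at hstop
    unfold pvRayGo
    rw [if_neg]
    · rfl
    intro ⟨a, b, c, d, e⟩
    exact hstop ⟨a, b, c, d, (pv_contains_false_iff occ _).mp e⟩
  | succ t ih =>
    intro fuel rr cc hf hfree hstop
    obtain ⟨m, rfl⟩ : ∃ m, fuel = m + 1 := ⟨fuel - 1, by omega⟩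
    have h0 := hfree 0 (by omega)
    simp only [Nat.cast_zero, zero_mul, add_zero] at h0
    unfold pvRayGo
    rw [if_pos]
    · rw [ih m (rr + dr) (cc + dc) (by omega)
        (fun i hi => by
          have := hfree (i + 1) (by omega)
          push_cast at this ⊢
          constructor
          · linarith [this.1]
          refine ⟨by linarith [this.2.1], by linarith [this.2.2.1], by linarith [this.2.2.2.1], ?_⟩
          have heq : rr + dr + ↑i * dr = rr + (↑i + 1) * dr := by ring
          have heq2 : cc + dc + ↑i * dc = cc + (↑i + 1) * dc := by ring
          rw [heq, heq2]; exact this.2.2.2.2)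
        (by
          push_cast at hstop ⊢
          have heq : rr + dr + ↑t * dr = rr + (↑t + 1) * dr := by ring
          have heq2 : cc + dc + ↑t * dc = cc + (↑t + 1) * dc := by ring
          rw [heq, heq2]; exact hstop)]
      push_cast; ring
    · exact ⟨h0.1, h0.2.1, h0.2.2.1, h0.2.2.2.1, (pv_contains_false_iff occ _).mpr h0.2.2.2.2⟩


-- horizontal rays: row r, piece column c, S = occupied columns of row r

theorem pv_ray_left_none (occ : List (Int × Int)) (r c : Int) (S : List Int)
    (hmem : ∀ j : Int, (r, j) ∈ occ ↔ j ∈ S) (hr : 0 ≤ r ∧ r < 11) (hc : 0 ≤ c ∧ c < 11)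
    (hno : ∀ x ∈ S, ¬ x < c) :
    pvRayGo occ 0 (-1) 11 r (c - 1) = c := by
  have h := pv_rayGo_eq occ 0 (-1) c.toNat 11 r (c - 1) (by omega)
    (fun i hi => by
      simp only [mul_zero, add_zero]
      refine ⟨hr.1, hr.2, by omega, by omega, ?_⟩
      intro hmem'
      exact hno _ ((hmem _).mp hmem') (by omega))
    (by
      simp only [mul_zero, add_zero]
      intro ⟨_, _, hb, _, _⟩
      omega)
  rw [h]; omega

theorem pv_ray_left_some (occ : List (Int × Int)) (r c : Int) (S : List Int)
    (hmem : ∀ j : Int, (r, j) ∈ occ ↔ j ∈ S) (hr : 0 ≤ r ∧ r < 11) (hc : 0 ≤ c ∧ c < 11)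
    (p : Int) (hp : p ∈ S) (hp0 : 0 ≤ p) (hpc : p < c)
    (hmax : ∀ x ∈ S, x < c → x ≤ p) :
    pvRayGo occ 0 (-1) 11 r (c - 1) = c - (p + 1) := by
  have h := pv_rayGo_eq occ 0 (-1) (c - 1 - p).toNat 11 r (c - 1) (by omega)
    (fun i hi => by
      simp only [mul_zero, add_zero]
      refine ⟨hr.1, hr.2, by omega, by omega, ?_⟩
      intro hmem'
      have := hmax _ ((hmem _).mp hmem') (by omega)
      omega)
    (by
      simp only [mul_zero, add_zero]
      intro ⟨_, _, _, _, hfree⟩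
      have hpos : c - 1 + ((c - 1 - p).toNat : Int) * -1 = p := by omega
      rw [hpos] at hfree
      exact hfree ((hmem p).mpr hp))
  rw [h]; omega

theorem pv_ray_right_none (occ : List (Int × Int)) (r c : Int) (S : List Int)
    (hmem : ∀ j : Int, (r, j) ∈ occ ↔ j ∈ S) (hr : 0 ≤ r ∧ r < 11) (hc : 0 ≤ c ∧ c < 11)
    (hno : ∀ x ∈ S, ¬ c < x) :
    pvRayGo occ 0 1 11 r (c + 1) = 11 - 1 - c := by
  have h := pv_rayGo_eq occ 0 1 (10 - c).toNat 11 r (c + 1) (by omega)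
    (fun i hi => by
      simp only [mul_zero, add_zero, mul_one]
      refine ⟨hr.1, hr.2, by omega, by omega, ?_⟩
      intro hmem'
      exact hno _ ((hmem _).mp hmem') (by omega))
    (by
      simp only [mul_zero, add_zero, mul_one]
      intro ⟨_, _, _, hb, _⟩
      omega)
  rw [h]; omega

theorem pv_ray_right_some (occ : List (Int × Int)) (r c : Int) (S : List Int)
    (hmem : ∀ j : Int, (r, j) ∈ occ ↔ j ∈ S) (hr : 0 ≤ r ∧ r < 11) (hc : 0 ≤ c ∧ c < 11)
    (q : Int) (hq : q ∈ S) (hq11 : q < 11) (hcq : c < q)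
    (hmin : ∀ x ∈ S, c < x → q ≤ x) :
    pvRayGo occ 0 1 11 r (c + 1) = (q - 1) - c := by
  have h := pv_rayGo_eq occ 0 1 (q - 1 - c).toNat 11 r (c + 1) (by omega)
    (fun i hi => by
      simp only [mul_zero, add_zero, mul_one]
      refine ⟨hr.1, hr.2, by omega, by omega, ?_⟩
      intro hmem'
      have := hmin _ ((hmem _).mp hmem') (by omega)
      omega)
    (by
      simp only [mul_zero, add_zero, mul_one]
      intro ⟨_, _, _, _, hfree⟩
      have hpos : c + 1 + ((q - 1 - c).toNat : Int) = q := by omega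
      rw [hpos] at hfree
      exact hfree ((hmem q).mpr hq))
  rw [h]; omega

-- vertical rays: column c, piece row r, S = occupied rows of column c

theorem pv_ray_up_none (occ : List (Int × Int)) (r c : Int) (S : List Int)
    (hmem : ∀ j : Int, (j, c) ∈ occ ↔ j ∈ S) (hr : 0 ≤ r ∧ r < 11) (hc : 0 ≤ c ∧ c < 11)
    (hno : ∀ x ∈ S, ¬ x < r) :
    pvRayGo occ (-1) 0 11 (r - 1) c = r := by
  have h := pv_rayGo_eq occ (-1) 0 r.toNat 11 (r - 1) c (by omega)
    (fun i hi => by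
      simp only [mul_zero, add_zero]
      refine ⟨by omega, by omega, hc.1, hc.2, ?_⟩
      intro hmem'
      exact hno _ ((hmem _).mp hmem') (by omega))
    (by
      simp only [mul_zero, add_zero]
      intro ⟨ha, _, _, _, _⟩
      omega)
  rw [h]; omega

theorem pv_ray_up_some (occ : List (Int × Int)) (r c : Int) (S : List Int)
    (hmem : ∀ j : Int, (j, c) ∈ occ ↔ j ∈ S) (hr : 0 ≤ r ∧ r < 11) (hc : 0 ≤ c ∧ c < 11)
    (p : Int) (hp : p ∈ S) (hp0 : 0 ≤ p) (hpr : p < r)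
    (hmax : ∀ x ∈ S, x < r → x ≤ p) :
    pvRayGo occ (-1) 0 11 (r - 1) c = r - (p + 1) := by
  have h := pv_rayGo_eq occ (-1) 0 (r - 1 - p).toNat 11 (r - 1) c (by omega)
    (fun i hi => by
      simp only [mul_zero, add_zero]
      refine ⟨by omega, by omega, hc.1, hc.2, ?_⟩
      intro hmem'
      have := hmax _ ((hmem _).mp hmem') (by omega)
      omega)
    (by
      simp only [mul_zero, add_zero]
      intro ⟨_, _, _, _, hfree⟩
      have hpos : r - 1 + ((r - 1 - p).toNat : Int) * -1 = p := by omega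
      rw [hpos] at hfree
      exact hfree ((hmem p).mpr hp))
  rw [h]; omega

theorem pv_ray_down_none (occ : List (Int × Int)) (r c : Int) (S : List Int)
    (hmem : ∀ j : Int, (j, c) ∈ occ ↔ j ∈ S) (hr : 0 ≤ r ∧ r < 11) (hc : 0 ≤ c ∧ c < 11)
    (hno : ∀ x ∈ S, ¬ r < x) :
    pvRayGo occ 1 0 11 (r + 1) c = 11 - 1 - r := by
  have h := pv_rayGo_eq occ 1 0 (10 - r).toNat 11 (r + 1) c (by omega)
    (fun i hi => by
      simp only [mul_zero, add_zero, mul_one]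
      refine ⟨by omega, by omega, hc.1, hc.2, ?_⟩
      intro hmem'
      exact hno _ ((hmem _).mp hmem') (by omega))
    (by
      simp only [mul_zero, add_zero, mul_one]
      intro ⟨_, ha, _, _, _⟩
      omega)
  rw [h]; omega

theorem pv_ray_down_some (occ : List (Int × Int)) (r c : Int) (S : List Int)
    (hmem : ∀ j : Int, (j, c) ∈ occ ↔ j ∈ S) (hr : 0 ≤ r ∧ r < 11) (hc : 0 ≤ c ∧ c < 11)
    (q : Int) (hq : q ∈ S) (hq11 : q < 11) (hrq : r < q)
    (hmin : ∀ x ∈ S, r < x → q ≤ x) :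
    pvRayGo occ 1 0 11 (r + 1) c = (q - 1) - r := by
  have h := pv_rayGo_eq occ 1 0 (q - 1 - r).toNat 11 (r + 1) c (by omega)
    (fun i hi => by
      simp only [mul_zero, add_zero, mul_one]
      refine ⟨by omega, by omega, hc.1, hc.2, ?_⟩
      intro hmem'
      have := hmin _ ((hmem _).mp hmem') (by omega)
      omega)
    (by
      simp only [mul_zero, add_zero, mul_one]
      intro ⟨_, _, _, _, hfree⟩
      have hpos : r + 1 + ((q - 1 - r).toNat : Int) = q := by omega
      rw [hpos] at hfree
      exact hfree ((hmem q).mpr hq))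
  rw [h]; omega

theorem pv_pred_none' (T : List Int) (hpw : T.Pairwise (· < ·)) (k : Nat) (hk : k < T.length)
    (hk0 : k = 0) : ∀ x ∈ T, ¬ x < T[k] := by
  intro x hx hlt
  obtain ⟨m, hm, rfl⟩ := List.mem_iff_getElem.mp hx
  rw [List.pairwise_iff_getElem] at hpw
  rcases Nat.lt_or_ge k m with h | h
  · exact absurd (hpw k m hk hm h) (by omega)
  · have : m = k := by omega
    subst this; omega

theorem pv_pred_max (T : List Int) (hpw : T.Pairwise (· < ·)) (k : Nat) (hk : k < T.length)
    (hk0 : k ≠ 0) :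
    T[k-1]'(by omega) ∈ T ∧ T[k-1]'(by omega) < T[k] ∧
      ∀ x ∈ T, x < T[k] → x ≤ T[k-1]'(by omega) := by
  rw [List.pairwise_iff_getElem] at hpw
  refine ⟨List.getElem_mem _, hpw (k-1) k (by omega) hk (by omega), ?_⟩
  intro x hx hlt
  obtain ⟨m, hm, rfl⟩ := List.mem_iff_getElem.mp hx
  rcases Nat.lt_or_ge m k with h | h
  · rcases Nat.lt_or_ge m (k-1) with h2 | h2
    · exact le_of_lt (hpw m (k-1) hm (by omega) h2)
    · have : m = k - 1 := by omega
      subst this; omega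
  · rcases Nat.eq_or_lt_of_le h with h2 | h2
    · subst h2; omega
    · exact absurd (hpw k m hk hm h2) (by omega)

theorem pv_succ_none' (T : List Int) (hpw : T.Pairwise (· < ·)) (k : Nat) (hk : k < T.length)
    (hklast : k + 1 = T.length) : ∀ x ∈ T, ¬ T[k] < x := by
  intro x hx hlt
  obtain ⟨m, hm, rfl⟩ := List.mem_iff_getElem.mp hx
  rw [List.pairwise_iff_getElem] at hpw
  rcases Nat.lt_or_ge m k with h | h
  · exact absurd (hpw m k hm hk h) (by omega)
  · have : m = k := by omega
    subst this; omega

theorem pv_succ_min (T : List Int) (hpw : T.Pairwise (· < ·)) (k : Nat) (hk : k < T.length)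
    (hklast : k + 1 ≠ T.length) :
    T[k+1]'(by omega) ∈ T ∧ T[k] < T[k+1]'(by omega) ∧
      ∀ x ∈ T, T[k] < x → T[k+1]'(by omega) ≤ x := by
  rw [List.pairwise_iff_getElem] at hpw
  refine ⟨List.getElem_mem _, hpw k (k+1) hk (by omega) (by omega), ?_⟩
  intro x hx hlt
  obtain ⟨m, hm, rfl⟩ := List.mem_iff_getElem.mp hx
  rcases Nat.lt_or_ge (k+1) m with h | h
  · exact le_of_lt (hpw (k+1) m (by omega) hm h)
  · rcases Nat.eq_or_lt_of_le h with h2 | h2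
    · subst h2; omega
    · rcases Nat.lt_or_ge m k with h3 | h3
      · exact absurd (hpw m k hm hk h3) (by omega)
      · have : m = k := by omega
        subst this; omega

theorem pv_pyGetD_map_nil (f : List Int → List Int) (hf : f [] = []) (xs : List (List Int))
    (i : Int) : PySem.List.pyGetD (xs.map f) i [] = f (PySem.List.pyGetD xs i []) := by
  conv_lhs => rw [← hf]
  exact PySem.List.pyGetD_map f xs i []

theorem pv_rows_getD (pieces : List (Int × Int)) (hin : ∀ p ∈ pieces, pvInBoard p)
    (i : Int) (h0 : 0 ≤ i) (h1 : i < 11) :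
    PySem.List.pyGetD (pvRows pieces) i []
      = PySem.List.sorted ((pieces.filter (fun q => q.1 == i)).map (fun q => q.2))
          (fun x => x) false := by
  unfold pvRows
  rw [pv_pyGetD_map_nil (fun l => PySem.List.sorted l (fun x => x) false) rfl _ i]
  congr 1
  rw [pv_foldAppend_getD (fun p => p.1) (fun p => p.2) pieces _ (by simp)
    (fun p hp => ⟨(hin p hp).1, (hin p hp).2.1⟩) i h0 h1]
  rw [PySem.List.pyGetD_eq_getElem _ _ h0 (by simp; omega), List.getElem_replicate]
  simp

theorem pv_cols_getD (pieces : List (Int × Int)) (hin : ∀ p ∈ pieces, pvInBoard p)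
    (i : Int) (h0 : 0 ≤ i) (h1 : i < 11) :
    PySem.List.pyGetD (pvColsL pieces) i []
      = PySem.List.sorted ((pieces.filter (fun q => q.2 == i)).map (fun q => q.1))
          (fun x => x) false := by
  unfold pvColsL
  rw [pv_pyGetD_map_nil (fun l => PySem.List.sorted l (fun x => x) false) rfl _ i]
  congr 1
  rw [pv_foldAppend_getD (fun p => p.2) (fun p => p.1) pieces _ (by simp)
    (fun p hp => ⟨(hin p hp).2.2.1, (hin p hp).2.2.2⟩) i h0 h1]
  rw [PySem.List.pyGetD_eq_getElem _ _ h0 (by simp; omega), List.getElem_replicate]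
  simp

theorem pv_left_eq (pieces : List (Int × Int)) (r c : Int) (T : List Int)
    (hmemT : ∀ j : Int, (r, j) ∈ pieces ↔ j ∈ T) (hbT : ∀ x ∈ T, 0 ≤ x ∧ x < 11)
    (hr : 0 ≤ r ∧ r < 11) (hc : 0 ≤ c ∧ c < 11) (hpw : T.Pairwise (· < ·))
    (k : Nat) (hk : k < T.length) (hTk : T[k] = c) :
    (if ((k : Int)) > 0 then c - (PySem.List.pyGetD T ((k : Int) - 1) 0 + 1) else c)
      = pvRayGo pieces 0 (-1) 11 r (c - 1) := by
  by_cases hk0 : k = 0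
  · rw [if_neg (by omega)]
    rw [pv_ray_left_none pieces r c T hmemT hr hc (hTk ▸ pv_pred_none' T hpw k hk hk0)]
  · rw [if_pos (by omega)]
    obtain ⟨hm1, hm2, hm3⟩ := pv_pred_max T hpw k hk hk0
    rw [hTk] at hm2 hm3
    rw [show ((k : Int) - 1) = (((k - 1 : Nat) : Int)) by omega]
    rw [PySem.List.pyGetD_eq_getElem _ _ (by omega) (by exact_mod_cast by omega)]
    rw [pv_ray_left_some pieces r c T hmemT hr hc (T[k-1]'(by omega)) hm1
      (hbT _ hm1).1 hm2 hm3]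
    simp

theorem pv_right_eq (pieces : List (Int × Int)) (r c : Int) (T : List Int)
    (hmemT : ∀ j : Int, (r, j) ∈ pieces ↔ j ∈ T) (hbT : ∀ x ∈ T, 0 ≤ x ∧ x < 11)
    (hr : 0 ≤ r ∧ r < 11) (hc : 0 ≤ c ∧ c < 11) (hpw : T.Pairwise (· < ·))
    (k : Nat) (hk : k < T.length) (hTk : T[k] = c) :
    (if ((k : Int)) < PySem.List.len T - 1
     then (PySem.List.pyGetD T ((k : Int) + 1) 0 - 1) - c else (11 - 1) - c)
      = pvRayGo pieces 0 1 11 r (c + 1) := by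
  rw [PySem.List.len_eq]
  by_cases hkl : k + 1 = T.length
  · rw [if_neg (by omega)]
    rw [pv_ray_right_none pieces r c T hmemT hr hc (hTk ▸ pv_succ_none' T hpw k hk hkl)]
  · rw [if_pos (by omega)]
    obtain ⟨hm1, hm2, hm3⟩ := pv_succ_min T hpw k hk hkl
    rw [hTk] at hm2 hm3
    rw [show ((k : Int) + 1) = (((k + 1 : Nat) : Int)) by omega]
    rw [PySem.List.pyGetD_eq_getElem _ _ (by omega) (by exact_mod_cast by omega)]
    rw [pv_ray_right_some pieces r c T hmemT hr hc (T[k+1]'(by omega)) hm1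
      (hbT _ hm1).2 hm2 hm3]
    simp

theorem pv_up_eq (pieces : List (Int × Int)) (r c : Int) (T : List Int)
    (hmemT : ∀ j : Int, (j, c) ∈ pieces ↔ j ∈ T) (hbT : ∀ x ∈ T, 0 ≤ x ∧ x < 11)
    (hr : 0 ≤ r ∧ r < 11) (hc : 0 ≤ c ∧ c < 11) (hpw : T.Pairwise (· < ·))
    (k : Nat) (hk : k < T.length) (hTk : T[k] = r) :
    (if ((k : Int)) > 0 then r - (PySem.List.pyGetD T ((k : Int) - 1) 0 + 1) else r)
      = pvRayGo pieces (-1) 0 11 (r - 1) c := by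
  by_cases hk0 : k = 0
  · rw [if_neg (by omega)]
    rw [pv_ray_up_none pieces r c T hmemT hr hc (hTk ▸ pv_pred_none' T hpw k hk hk0)]
  · rw [if_pos (by omega)]
    obtain ⟨hm1, hm2, hm3⟩ := pv_pred_max T hpw k hk hk0
    rw [hTk] at hm2 hm3
    rw [show ((k : Int) - 1) = (((k - 1 : Nat) : Int)) by omega]
    rw [PySem.List.pyGetD_eq_getElem _ _ (by omega) (by exact_mod_cast by omega)]
    rw [pv_ray_up_some pieces r c T hmemT hr hc (T[k-1]'(by omega)) hm1
      (hbT _ hm1).1 hm2 hm3]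
    simp

theorem pv_down_eq (pieces : List (Int × Int)) (r c : Int) (T : List Int)
    (hmemT : ∀ j : Int, (j, c) ∈ pieces ↔ j ∈ T) (hbT : ∀ x ∈ T, 0 ≤ x ∧ x < 11)
    (hr : 0 ≤ r ∧ r < 11) (hc : 0 ≤ c ∧ c < 11) (hpw : T.Pairwise (· < ·))
    (k : Nat) (hk : k < T.length) (hTk : T[k] = r) :
    (if ((k : Int)) < PySem.List.len T - 1
     then (PySem.List.pyGetD T ((k : Int) + 1) 0 - 1) - r else (11 - 1) - r)
      = pvRayGo pieces 1 0 11 (r + 1) c := by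
  rw [PySem.List.len_eq]
  by_cases hkl : k + 1 = T.length
  · rw [if_neg (by omega)]
    rw [pv_ray_down_none pieces r c T hmemT hr hc (hTk ▸ pv_succ_none' T hpw k hk hkl)]
  · rw [if_pos (by omega)]
    obtain ⟨hm1, hm2, hm3⟩ := pv_succ_min T hpw k hk hkl
    rw [hTk] at hm2 hm3
    rw [show ((k : Int) + 1) = (((k + 1 : Nat) : Int)) by omega]
    rw [PySem.List.pyGetD_eq_getElem _ _ (by omega) (by exact_mod_cast by omega)]
    rw [pv_ray_down_some pieces r c T hmemT hr hc (T[k+1]'(by omega)) hm1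
      (hbT _ hm1).2 hm2 hm3]
    simp

theorem pv_row_mem (pieces : List (Int × Int)) (r j : Int) :
    (r, j) ∈ pieces ↔ j ∈ (pieces.filter (fun q => q.1 == r)).map (fun q => q.2) := by
  simp only [List.mem_map, List.mem_filter, beq_iff_eq]
  constructor
  · intro h; exact ⟨(r, j), ⟨h, rfl⟩, rfl⟩
  · rintro ⟨⟨a, b⟩, ⟨hmem, h1⟩, h2⟩
    simp only at h1 h2
    subst h1; subst h2; exact hmem

theorem pv_col_mem (pieces : List (Int × Int)) (c j : Int) :
    (j, c) ∈ pieces ↔ j ∈ (pieces.filter (fun q => q.2 == c)).map (fun q => q.1) := by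
  simp only [List.mem_map, List.mem_filter, beq_iff_eq]
  constructor
  · intro h; exact ⟨(j, c), ⟨h, rfl⟩, rfl⟩
  · rintro ⟨⟨a, b⟩, ⟨hmem, h1⟩, h2⟩
    simp only at h1 h2
    subst h1; subst h2; exact hmem

theorem pv_row_nodup (pieces : List (Int × Int)) (hnd : pieces.Nodup) (r : Int) :
    ((pieces.filter (fun q => q.1 == r)).map (fun q => q.2)).Nodup := by
  apply List.Nodup.map_on _ (hnd.filter _)
  intro x hx y hy hxy
  have h1 := (List.mem_filter.mp hx).2
  have h2 := (List.mem_filter.mp hy).2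
  simp only [beq_iff_eq] at h1 h2
  cases x; cases y; simp_all

theorem pv_col_nodup (pieces : List (Int × Int)) (hnd : pieces.Nodup) (c : Int) :
    ((pieces.filter (fun q => q.2 == c)).map (fun q => q.1)).Nodup := by
  apply List.Nodup.map_on _ (hnd.filter _)
  intro x hx y hy hxy
  have h1 := (List.mem_filter.mp hx).2
  have h2 := (List.mem_filter.mp hy).2
  simp only [beq_iff_eq] at h1 h2
  cases x; cases y; simp_all

theorem pv_pieceMove_eq (pieces : List (Int × Int)) (hnd : pieces.Nodup)
    (hin : ∀ q ∈ pieces, pvInBoard q) (p : Int × Int) (hp : p ∈ pieces) :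
    pvPieceMove (pvRows pieces) (pvColsL pieces) p = (pvCountMoves pieces p, p) := by
  obtain ⟨r, c⟩ := p
  obtain ⟨hr0, hr1, hc0, hc1⟩ := hin _ hp
  -- row-side sorted list T
  set S := (pieces.filter (fun q => q.1 == r)).map (fun q => q.2) with hSdef
  set T := PySem.List.sorted S (fun x => x) false with hTdef
  have hpermT : T.Perm S := PySem.List.sorted_perm S _ false
  have hmemT : ∀ j : Int, (r, j) ∈ pieces ↔ j ∈ T :=
    fun j => (pv_row_mem pieces r j).trans (hpermT.mem_iff).symm
  have hbT : ∀ x ∈ T, 0 ≤ x ∧ x < 11 := by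
    intro x hx
    have := (hmemT x).mpr hx
    have h := hin _ this
    exact ⟨h.2.2.1, h.2.2.2⟩
  have hTnd : T.Nodup := (hpermT.symm).nodup (pv_row_nodup pieces hnd r)
  have hTle : T.Pairwise (fun a b => a ≤ b) := PySem.List.sorted_pairwise S (fun x => x)
  have hTpw : T.Pairwise (· < ·) :=
    (hTle.and hTnd).imp (fun h => lt_of_le_of_ne h.1 h.2)
  have hcT : c ∈ T := (hmemT c).mp hp
  obtain ⟨k, hidxT⟩ := Option.isSome_iff_exists.mp
    ((PySem.List.index?_isSome_iff T c).mpr hcT)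
  obtain ⟨hk, hTk, -⟩ := PySem.List.getElem_of_index?_eq_some hidxT
  -- column-side sorted list U
  set S' := (pieces.filter (fun q => q.2 == c)).map (fun q => q.1) with hS'def
  set U := PySem.List.sorted S' (fun x => x) false with hUdef
  have hpermU : U.Perm S' := PySem.List.sorted_perm S' _ false
  have hmemU : ∀ j : Int, (j, c) ∈ pieces ↔ j ∈ U :=
    fun j => (pv_col_mem pieces c j).trans (hpermU.mem_iff).symm
  have hbU : ∀ x ∈ U, 0 ≤ x ∧ x < 11 := by
    intro x hx
    have := (hmemU x).mpr hx
    have h := hin _ this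
    exact ⟨h.1, h.2.1⟩
  have hUnd : U.Nodup := (hpermU.symm).nodup (pv_col_nodup pieces hnd c)
  have hUle : U.Pairwise (fun a b => a ≤ b) := PySem.List.sorted_pairwise S' (fun x => x)
  have hUpw : U.Pairwise (· < ·) :=
    (hUle.and hUnd).imp (fun h => lt_of_le_of_ne h.1 h.2)
  have hrU : r ∈ U := (hmemU r).mp hp
  obtain ⟨l, hidxU⟩ := Option.isSome_iff_exists.mp
    ((PySem.List.index?_isSome_iff U r).mpr hrU)
  obtain ⟨hl, hUl, -⟩ := PySem.List.getElem_of_index?_eq_some hidxU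
  -- unfold both sides
  simp only [pvPieceMove, pvCountMoves, List.foldl]
  rw [pv_rows_getD pieces hin r hr0 hr1, pv_cols_getD pieces hin c hc0 hc1]
  rw [← hSdef, ← hTdef, ← hS'def, ← hUdef, hidxT, hidxU]
  simp only [Option.getD_some]
  simp only [add_zero, zero_add, ← sub_eq_add_neg]
  rw [Prod.mk.injEq]
  refine ⟨?_, rfl⟩
  rw [← pv_left_eq pieces r c T hmemT hbT ⟨hr0, hr1⟩ ⟨hc0, hc1⟩ hTpw k hk hTk]
  rw [← pv_right_eq pieces r c T hmemT hbT ⟨hr0, hr1⟩ ⟨hc0, hc1⟩ hTpw k hk hTk]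
  rw [← pv_up_eq pieces r c U hmemU hbU ⟨hr0, hr1⟩ ⟨hc0, hc1⟩ hUpw l hl hUl]
  rw [← pv_down_eq pieces r c U hmemU hbU ⟨hr0, hr1⟩ ⟨hc0, hc1⟩ hUpw l hl hUl]
  ring

theorem pv_key3_fst_le {a b : Int × (Int × Int)} (h : pvKey3 b ≤ pvKey3 a) : b.1 ≤ a.1 := by
  rw [pvKey3, pvKey3, Prod.Lex.le_iff] at h
  rcases h with h | h
  · exact le_of_lt h
  · exact le_of_eq h.1

theorem pv_map_fst_sorted (P : List (Int × (Int × Int))) :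
    (PySem.List.sorted P pvKey3 true).map (fun q => q.1)
      = PySem.List.sorted (P.map (fun q => q.1)) (fun x => x) true := by
  rw [← List.reverse_inj]
  apply PySem.List.eq_of_perm_of_pairwise_le_of_injective (fun x : Int => x)
    (fun a b h => h)
  · exact ((List.reverse_perm _).trans
      (((PySem.List.sorted_perm P pvKey3 true).map _).trans
        (((PySem.List.sorted_perm (P.map (fun q => q.1)) (fun x => x) true)).symm.trans
          (List.reverse_perm _).symm)))
  · rw [List.pairwise_reverse]
    exact (PySem.List.sorted_pairwise_rev P pvKey3).map _
      (fun {a b} h => pv_key3_fst_le h)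
  · rw [List.pairwise_reverse]
    exact PySem.List.sorted_pairwise_rev (P.map (fun q => q.1)) (fun x => x)

theorem pv_slice_map_fst (f : (Int × (Int × Int)) → Int) (xs : List (Int × (Int × Int)))
    (b : Int) :
    PySem.List.slice (xs.map f) none (some b) = (PySem.List.slice xs none (some b)).map f := by
  by_cases hb : 0 ≤ b
  · rw [PySem.List.slice_to _ hb, PySem.List.slice_to _ hb, List.map_take]
  · obtain ⟨kk, hk1, rfl⟩ : ∃ kk : Nat, 0 < kk ∧ b = -(kk : Int) :=
      ⟨(-b).toNat, by omega, by omega⟩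
    rw [PySem.List.slice_to_neg_natCast _ _ hk1, PySem.List.slice_to_neg_natCast _ _ hk1,
      List.length_map, List.map_take]

theorem pv_bms_fst (occ : List (Int × Int)) (hnd : occ.Nodup)
    (hin : ∀ q ∈ occ, pvInBoard q) (mm : Int) :
    (best_movers_subset occ mm).1 = pvAltVal occ mm := by
  simp only [best_movers_subset, pvAltVal]
  rw [PySem.List.foldl_append_singleton_eq_map, List.nil_append]
  rw [List.map_congr_left (fun p hp => pv_pieceMove_eq occ hnd hin p hp)]
  have hfst : (PySem.List.sorted (occ.map (fun p => (pvCountMoves occ p, p))) pvKey3 true).map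
        (fun q => q.1)
      = PySem.List.sorted (occ.map fun p => pvCountMoves occ p) (fun x => x) true := by
    rw [pv_map_fst_sorted, List.map_map]
    rfl
  have hlen : PySem.List.len (PySem.List.sorted (occ.map (fun p => (pvCountMoves occ p, p)))
        pvKey3 true)
      = PySem.List.len (PySem.List.sorted (occ.map fun p => pvCountMoves occ p)
        (fun x => x) true) := by
    simp [PySem.List.len_eq, PySem.List.length_sorted, List.length_map]
  rw [← pv_slice_map_fst (fun q => q.1), hfst, hlen]

-- pieces.add(best_pos): Python would add None when best_pos is None (unreachable under Pre_)

theorem pv_step_eq (mm : Int) (st : PySem.Set (Int × Int) × Int)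
    (h : pvInv st.1) (i : Int) : pvStepA mm st i = pvStepB mm st i := by
  unfold pvStepA pvStepB
  have hinner : ∀ init, (PySem.List.pyRange 0 11 1).foldl (fun acc r =>
      (PySem.List.pyRange 0 11 1).foldl (fun acc c =>
        if PySem.Set.contains st.1 (r, c) then acc
        else
          let val := (best_movers_subset (PySem.Set.union st.1 [(r, c)]) mm).1
          if val > acc.2 then (some (r, c), val) else acc) acc) init
    = (PySem.List.pyRange 0 11 1).foldl (fun acc r =>
      (PySem.List.pyRange 0 11 1).foldl (fun acc c =>
        if PySem.Set.contains st.1 (r, c) then acc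
        else
          let val := pvAltVal (PySem.Set.union st.1 [(r, c)]) mm
          if val > acc.2 then (some (r, c), val) else acc) acc) init := by
    intro init
    apply PySem.List.foldl_congr_mem
    intro acc r hr
    apply PySem.List.foldl_congr_mem
    intro acc' c hc
    have hval : (best_movers_subset (PySem.Set.union st.1 [(r, c)]) mm).1
        = pvAltVal (PySem.Set.union st.1 [(r, c)]) mm := by
      apply pv_bms_fst
      · exact PySem.Set.nodup_union st.1 [(r, c)] h.1
      · intro q hq
        rcases (PySem.Set.mem_union st.1 [(r, c)] q).mp hq with hq' | hq'
        · exact h.2 q hq'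
        · have hrb := PySem.List.mem_pyRange_one.mp hr
          have hcb := PySem.List.mem_pyRange_one.mp hc
          simp at hq'
          subst hq'
          exact ⟨hrb.1, hrb.2, hcb.1, hcb.2⟩
    by_cases hmem : (r, c) ∈ st.1
    · simp [hmem]
    · simp [hmem, hval]
  rw [hinner]

theorem pv_inner_pos (mm : Int) (st : PySem.Set (Int × Int) × Int) :
    ∀ p, ((PySem.List.pyRange 0 11 1).foldl (fun acc r =>
      (PySem.List.pyRange 0 11 1).foldl (fun acc c =>
        if PySem.Set.contains st.1 (r, c) then acc
        else
          let val := pvAltVal (PySem.Set.union st.1 [(r, c)]) mm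
          if val > acc.2 then (some (r, c), val) else acc) acc)
      ((none : Option (Int × Int)), (-1 : Int))).1 = some p → pvInBoard p := by
  refine List.foldlRecOn
    (motive := fun acc : Option (Int × Int) × Int => ∀ p, acc.1 = some p → pvInBoard p)
    _ _ ?_ ?_
  · intro p hp; simp at hp
  · intro b hb r hr
    refine List.foldlRecOn
      (motive := fun acc : Option (Int × Int) × Int => ∀ p, acc.1 = some p → pvInBoard p)
      _ _ hb ?_
    intro b' hb' c hc
    intro p hp
    by_cases hmem : (r, c) ∈ st.1
    · simp only [PySem.Set.contains_eq_listContains, List.contains_iff_mem] at hp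
      rw [if_pos hmem] at hp
      exact hb' p hp
    · simp only [PySem.Set.contains_eq_listContains, List.contains_iff_mem] at hp
      rw [if_neg hmem] at hp
      by_cases hgt : pvAltVal (PySem.Set.union st.1 [(r, c)]) mm > b'.2
      · rw [if_pos hgt] at hp
        have hrb := PySem.List.mem_pyRange_one.mp hr
        have hcb := PySem.List.mem_pyRange_one.mp hc
        simp only at hp
        cases hp
        exact ⟨hrb.1, hrb.2, hcb.1, hcb.2⟩
      · rw [if_neg hgt] at hp
        exact hb' p hp

theorem pv_addOpt_inv (s : PySem.Set (Int × Int)) (h : pvInv s)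
    (o : Option (Int × Int)) (ho : ∀ p, o = some p → pvInBoard p) :
    pvInv (pvAddOpt s o) := by
  cases o with
  | none => exact h
  | some p =>
    refine ⟨PySem.Set.nodup_add s p h.1, ?_⟩
    intro q hq
    rcases (PySem.Set.mem_add s p q).mp hq with hq' | hq'
    · exact h.2 q hq'
    · subst hq'
      exact ho q rfl

set_option maxHeartbeats 1000000 in
theorem pv_step_inv (mm : Int) (st : PySem.Set (Int × Int) × Int) (i : Int)
    (h : pvInv st.1) : pvInv ((pvStepB mm st i).1) := by
  unfold pvStepB
  exact pv_addOpt_inv st.1 h _ (pv_inner_pos mm st)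

theorem pv_fold_eq (mm : Int) (l : List Int) :
    ∀ st : PySem.Set (Int × Int) × Int, pvInv st.1 →
    l.foldl (pvStepA mm) st = l.foldl (pvStepB mm) st := by
  induction l with
  | nil => intro st _; rw [List.foldl_nil, List.foldl_nil]
  | cons x l ih =>
    intro st h
    rw [List.foldl_cons, List.foldl_cons, pv_step_eq mm st h x]
    exact ih _ (pv_step_inv mm st x h)

-- ===== VERDICT (by name: the statement is the Claim_ definition above) =====
theorem greedy_add_spec : Claim_equal_greedy_add := by
  intro n max_movers _ _
  unfold Spec_greedy_add greedy_add greedy_add_alt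
  exact pv_fold_eq max_movers _ _ ⟨List.nodup_nil, by simp⟩
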